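-- pv_equiv track=rewrite | github.com/mikamp116/cv-p2 | localizacion_matricula.py | get_external_rectangles2
-- ===== SOURCE A (Python) =====
-- def get_external_rectangles2(aux):
--     length = len(aux)
--     external_rects = []
--     for i in range(length):
--         rect = aux[i]
--         internal = False
--         j = 0
--         while not internal and j < length:
--             if i != j:
--                 aux_rect = aux[j]
--                 internal = aux_rect[0] < rect[0] < aux_rect[0]+aux_rect[2] and aux_rect[1] < rect[1] < aux_rect[1]+aux_rect[3]
--             j = j+1
--         if not internal:
--             external_rects.append(rect)
--     return external_rects
-- ===== SOURCE B (Python) =====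
-- def _scan_sorted(srt, r):
--     # srt is sorted ascending by x; once s[0] >= r[0] no later rectangle can
--     # strictly contain r's top-left corner, so the scan stops there.
--     for s in srt:
--         if s[0] >= r[0]:
--             return False
--         if r[0] < s[0] + s[2] and s[1] < r[1] < s[1] + s[3]:
--             return True
--     return False
--
--
-- def get_external_rectangles2(aux):
--     # Sort-then-scan: one sort by x, then each corner query scans only the
--     # prefix of candidate containers with strictly smaller x.
--     srt = sorted(aux, key=lambda s: s[0])
--     return [r for r in aux if not _scan_sorted(srt, r)]
-- ===== Notes on version B (the rewrite author's own statement) =====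
-- stated objective: alternative
-- what changed: A runs an all-pairs index loop with an early-exit flag testing every other rectangle as a container; B sorts the rectangles once by x-coordinate and answers each corner query by scanning the sorted list with early termination as soon as a rectangle's x is not below the corner's x, so only the prefix of possible containers is ever examined.
import Mathlib
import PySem

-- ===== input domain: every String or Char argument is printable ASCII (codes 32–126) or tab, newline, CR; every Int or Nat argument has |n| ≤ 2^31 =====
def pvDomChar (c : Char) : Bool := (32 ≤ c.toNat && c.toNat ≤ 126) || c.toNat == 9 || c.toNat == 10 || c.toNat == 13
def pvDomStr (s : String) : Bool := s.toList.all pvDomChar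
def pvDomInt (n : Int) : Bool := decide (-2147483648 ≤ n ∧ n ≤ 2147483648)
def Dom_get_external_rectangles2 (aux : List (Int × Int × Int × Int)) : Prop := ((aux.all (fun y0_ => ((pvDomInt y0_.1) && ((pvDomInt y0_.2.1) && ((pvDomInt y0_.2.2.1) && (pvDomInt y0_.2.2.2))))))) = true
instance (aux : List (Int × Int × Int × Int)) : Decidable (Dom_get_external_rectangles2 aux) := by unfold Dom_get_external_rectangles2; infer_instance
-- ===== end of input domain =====

-- B replaces A's all-pairs index loop by sort-then-scan: rectangles are sorted once by
-- x, and each corner query scans the sorted list, stopping as soon as a rectangle's x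
-- is not strictly below the corner's x. Alternative decomposition; not measured faster.

-- ===== PORT A =====
-- the inner 'while not internal and j < length' loop of A (internal is overwritten each step)
def pvInnerA (aux : List (Int × Int × Int × Int)) (length i : Int)
    (rect : Int × Int × Int × Int) (internal : Bool) (j : Int) : Bool :=
  if h : internal = false ∧ j < length then
    let internal' :=
      if i ≠ j then
        match PySem.List.pyGet? aux j with
        | some aux_rect =>
            decide (aux_rect.1 < rect.1) && decide (rect.1 < aux_rect.1 + aux_rect.2.2.1) &&
            decide (aux_rect.2.1 < rect.2.1) && decide (rect.2.1 < aux_rect.2.1 + aux_rect.2.2.2)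
        | none => internal
      else internal
    pvInnerA aux length i rect internal' (j + 1)
  else internal
termination_by (length - j).toNat
decreasing_by omega

def get_external_rectangles2 (aux : List (Int × Int × Int × Int)) : List (Int × Int × Int × Int) :=
  let length : Int := aux.length
  (PySem.List.pyRange 0 length 1).foldl
    (fun external_rects i =>
      let rect := PySem.List.pyGetD aux i (0, 0, 0, 0)
      let internal := pvInnerA aux length i rect false 0
      if internal then external_rects else external_rects ++ [rect])
    []

-- ===== PORT B =====
-- _scan_sorted: early-terminating scan over the x-sorted list
def pvScanSorted (srt : List (Int × Int × Int × Int)) (r : Int × Int × Int × Int) : Bool :=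
  match srt with
  | [] => false
  | s :: t =>
    if r.1 ≤ s.1 then false
    else if decide (r.1 < s.1 + s.2.2.1) && decide (s.2.1 < r.2.1) &&
            decide (r.2.1 < s.2.1 + s.2.2.2) then true
    else pvScanSorted t r

def get_external_rectangles2_alt (aux : List (Int × Int × Int × Int)) : List (Int × Int × Int × Int) :=
  let srt := PySem.List.sorted aux (fun s => s.1) false
  aux.filter (fun r => !(pvScanSorted srt r))

-- ===== PRECONDITION & SPEC =====
def Spec_get_external_rectangles2 (aux : List (Int × Int × Int × Int)) (out : List (Int × Int × Int × Int)) : Prop := out = get_external_rectangles2_alt aux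
instance (aux : List (Int × Int × Int × Int)) (out : List (Int × Int × Int × Int)) : Decidable (Spec_get_external_rectangles2 aux out) := by unfold Spec_get_external_rectangles2; infer_instance

-- ===== CLAIM =====
def Claim_equal_get_external_rectangles2 : Prop := ∀ (aux : List (Int × Int × Int × Int)), Dom_get_external_rectangles2 aux → Spec_get_external_rectangles2 aux (get_external_rectangles2 aux)

-- ===== LEMMAS AND PROOFS =====
-- both programs compute aux.filter (fun r => !(aux.any (fun s => pvCovers s r)))

def pvCovers (s r : Int × Int × Int × Int) : Bool :=
  decide (s.1 < r.1) && decide (r.1 < s.1 + s.2.2.1) &&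
  decide (s.2.1 < r.2.1) && decide (r.2.1 < s.2.1 + s.2.2.2)

def pvCheck (aux : List (Int × Int × Int × Int)) (rect : Int × Int × Int × Int) (k : Int) : Bool :=
  match PySem.List.pyGet? aux k with
  | some s => pvCovers s rect
  | none => false

lemma innerA_or (aux : List (Int × Int × Int × Int)) (n i : Int) (rect : Int × Int × Int × Int)
    (j : Int) (b : Bool) :
    pvInnerA aux n i rect b j = (b || pvInnerA aux n i rect false j) := by
  cases b
  · rfl
  · rw [pvInnerA]; simp

lemma innerA_eq (aux : List (Int × Int × Int × Int)) (i : Int) (rect : Int × Int × Int × Int)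
    (j : Int) (hj : 0 ≤ j) :
    pvInnerA aux (aux.length : Int) i rect false j
      = (PySem.List.pyRange j (aux.length : Int) 1).any
          (fun k => decide (k ≠ i) && pvCheck aux rect k) := by
  by_cases hlt : j < (aux.length : Int)
  · have hget : PySem.List.pyGet? aux j = some (aux[j.toNat]'(by omega)) :=
      PySem.List.pyGet?_eq_some_getElem aux hj hlt
    have IH := innerA_eq aux i rect (j + 1) (by omega)
    rw [pvInnerA, dif_pos ⟨rfl, hlt⟩, PySem.List.pyRange_one_cons hlt, List.any_cons]
    by_cases hij : i = j
    · subst hij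
      rw [if_neg (by simp), innerA_or, IH]
      simp
    · have hji : j ≠ i := fun h => hij h.symm
      rw [if_pos hij, hget, innerA_or, IH]
      simp [pvCheck, hget, pvCovers, hji]
  · rw [pvInnerA, dif_neg (by omega), PySem.List.pyRange_one_eq_nil (by omega)]
    simp
termination_by ((aux.length : Int) - j).toNat
decreasing_by omega

lemma any_drop_ne (l : List Int) (i : Int) (f : Int → Bool) (hf : f i = false) :
    (l.any (fun k => decide (k ≠ i) && f k)) = l.any f := by
  induction l with
  | nil => rfl
  | cons a t ih =>
      simp only [List.any_cons, ih]
      by_cases ha : a = i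
      · subst ha; simp [hf]
      · simp [ha]

lemma inner_any (aux : List (Int × Int × Int × Int)) (i : Int) (h0 : 0 ≤ i)
    (h1 : i < (aux.length : Int)) :
    pvInnerA aux (aux.length : Int) i (PySem.List.pyGetD aux i (0,0,0,0)) false 0
      = aux.any (fun s => pvCovers s (PySem.List.pyGetD aux i (0,0,0,0))) := by
  set rect := PySem.List.pyGetD aux i (0,0,0,0) with hrect
  rw [innerA_eq aux i rect 0 le_rfl]
  rw [any_drop_ne _ i _ (by
    have hget : PySem.List.pyGet? aux i = some (aux[i.toNat]'(by omega)) :=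
      PySem.List.pyGet?_eq_some_getElem aux h0 h1
    have : rect = aux[i.toNat]'(by omega) := by
      rw [hrect, PySem.List.pyGetD_eq_getElem aux (0,0,0,0) h0 h1]
    simp [pvCheck, hget, ← this, pvCovers])]
  have hmap := PySem.List.map_pyGetD_pyRange_zero' aux ((0,0,0,0) : Int × Int × Int × Int)
  calc (PySem.List.pyRange 0 (aux.length : Int) 1).any (pvCheck aux rect)
      = (PySem.List.pyRange 0 (aux.length : Int) 1).any
          (fun k => pvCovers (PySem.List.pyGetD aux k (0,0,0,0)) rect) := by
        apply PySem.List.any_congr_mem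
        intro k hk
        have hk' := (PySem.List.mem_pyRange_one.mp hk)
        have hget : PySem.List.pyGet? aux k = some (aux[k.toNat]'(by omega)) :=
          PySem.List.pyGet?_eq_some_getElem aux hk'.1 hk'.2
        rw [PySem.List.pyGetD_eq_getElem aux (0,0,0,0) hk'.1 hk'.2]
        simp [pvCheck, hget]
    _ = ((PySem.List.pyRange 0 (aux.length : Int) 1).map
          (fun k => PySem.List.pyGetD aux k (0,0,0,0))).any (fun s => pvCovers s rect) := by
        rw [List.any_map]; rfl
    _ = aux.any (fun s => pvCovers s rect) := by rw [hmap]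

lemma a_eq_filter (aux : List (Int × Int × Int × Int)) :
    get_external_rectangles2 aux = aux.filter (fun r => !(aux.any (fun s => pvCovers s r))) := by
  simp only [get_external_rectangles2]
  rw [PySem.List.foldl_congr_mem _ _
      (fun ext i =>
        if !(aux.any (fun s => pvCovers s (PySem.List.pyGetD aux i (0,0,0,0)))) then
          ext ++ [PySem.List.pyGetD aux i (0,0,0,0)]
        else ext)
      _
      (by
        intro acc x hx
        have hx' := PySem.List.mem_pyRange_one.mp hx
        rw [inner_any aux x hx'.1 hx'.2]
        cases h : aux.any (fun s => pvCovers s (PySem.List.pyGetD aux x (0,0,0,0))) <;> simp [h])]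
  rw [PySem.List.foldl_append_if]
  have hcomp : (fun i => !(aux.any (fun s => pvCovers s (PySem.List.pyGetD aux i (0,0,0,0)))))
      = ((fun r => !(aux.any (fun s => pvCovers s r))) ∘
         (fun i => PySem.List.pyGetD aux i ((0,0,0,0) : Int × Int × Int × Int))) := rfl
  rw [hcomp, ← List.filter_map,
    PySem.List.map_pyGetD_pyRange_zero' aux ((0,0,0,0) : Int × Int × Int × Int)]
  simp

-- the early-terminating scan over an x-sorted list computes 'some element strictly covers r'
lemma scan_sorted_eq_any (l : List (Int × Int × Int × Int)) (r : Int × Int × Int × Int)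
    (hs : l.Pairwise (fun a b => a.1 ≤ b.1)) :
    pvScanSorted l r = l.any (fun s => pvCovers s r) := by
  induction l with
  | nil => rfl
  | cons s t ih =>
      rcases List.pairwise_cons.mp hs with ⟨hle, htail⟩
      rw [pvScanSorted, List.any_cons]
      by_cases hstop : r.1 ≤ s.1
      · rw [if_pos hstop]
        have hhead : pvCovers s r = false := by simp [pvCovers]; omega
        have htailfalse : t.any (fun u => pvCovers u r) = false := by
          rw [List.any_eq_false]
          intro u hu
          have := hle u hu
          simp [pvCovers]; omega
        simp [hhead, htailfalse]
      · rw [if_neg hstop]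
        have hx : s.1 < r.1 := by omega
        by_cases hcov : (decide (r.1 < s.1 + s.2.2.1) && decide (s.2.1 < r.2.1) &&
            decide (r.2.1 < s.2.1 + s.2.2.2)) = true
        · rw [if_pos hcov]
          have : pvCovers s r = true := by
            simp at hcov; simp [pvCovers, hx, hcov]
          simp [this]
        · rw [if_neg hcov, ih htail]
          have : pvCovers s r = false := by
            simp at hcov ⊢; simp [pvCovers]
            intro _ h1 h2; exact hcov h1 h2
          simp [this]

lemma b_eq_filter (aux : List (Int × Int × Int × Int)) :
    get_external_rectangles2_alt aux = aux.filter (fun r => !(aux.any (fun s => pvCovers s r))) := by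
  simp only [get_external_rectangles2_alt]
  apply List.filter_congr
  intro r _
  rw [scan_sorted_eq_any _ r (PySem.List.sorted_pairwise aux (fun s => s.1)),
    (PySem.List.sorted_perm aux (fun s => s.1) false).any_eq]

-- ===== VERDICT =====
theorem get_external_rectangles2_spec : Claim_equal_get_external_rectangles2 := by
  intro aux _
  unfold Spec_get_external_rectangles2
  rw [a_eq_filter, b_eq_filter]
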